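-- pv_equiv track=rewrite | github.com/CaerangManagement/2022-Tensor | Algorithm/Code/Week5/week5_20225191_양진은.py | score_cal
-- ===== SOURCE A (Python) =====
-- def score_cal(quiz_answer):
--   score = 0
--   continuity = 0
--   for answer in quiz_answer:
--     if "O" == answer:
--       score += continuity + 1
--       continuity += 1
--     elif "X" == answer:
--       continuity = 0
--   return score
-- ===== SOURCE B (Python) =====
-- def score_cal(quiz_answer):
--     total = 0
--     m = 0
--     for a in quiz_answer:
--         if a == "O":
--             m += 1
--         elif a == "X":
--             total += m * (m + 1) // 2
--             m = 0
--     return total + m * (m + 1) // 2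
-- ===== Notes on version B (the rewrite author's own statement) =====
-- stated objective: alternative
-- what changed: Replaces the element-wise streak-bonus accumulation (score += continuity+1 at each 'O') with a per-segment closed form: count 'O's per segment split on 'X' and add the triangular number m*(m+1)//2 once per segment.
import Mathlib
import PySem

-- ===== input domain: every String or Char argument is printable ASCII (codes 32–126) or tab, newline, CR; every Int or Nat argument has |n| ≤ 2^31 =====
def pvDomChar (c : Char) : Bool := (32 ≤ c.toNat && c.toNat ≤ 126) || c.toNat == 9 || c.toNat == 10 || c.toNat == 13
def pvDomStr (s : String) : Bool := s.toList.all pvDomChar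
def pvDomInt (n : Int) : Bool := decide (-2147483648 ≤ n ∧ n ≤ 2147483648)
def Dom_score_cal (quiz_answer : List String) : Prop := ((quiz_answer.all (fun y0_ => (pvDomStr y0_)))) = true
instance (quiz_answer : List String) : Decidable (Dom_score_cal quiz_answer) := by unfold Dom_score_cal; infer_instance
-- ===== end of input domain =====

-- B replaces per-'O' streak accumulation with a per-segment triangular-number sum (alternative decomposition, same O(n) cost).

-- ===== PORT A =====
def score_cal (quiz_answer : List String) : Int :=
  (quiz_answer.foldl
    (fun (st : Int × Int) answer =>
      if "O" == answer then (st.1 + st.2 + 1, st.2 + 1)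
      else if "X" == answer then (st.1, 0)
      else st)
    (0, 0)).1

-- ===== PORT B =====
def score_cal_alt (quiz_answer : List String) : Int :=
  let st := quiz_answer.foldl
    (fun (st : Int × Int) a =>
      if a == "O" then (st.1, st.2 + 1)
      else if a == "X" then (st.1 + PySem.Int.floordiv (st.2 * (st.2 + 1)) 2, 0)
      else st)
    (0, 0)
  st.1 + PySem.Int.floordiv (st.2 * (st.2 + 1)) 2

-- ===== PRECONDITION & SPEC =====
def Spec_score_cal (quiz_answer : List String) (out : Int) : Prop := out = score_cal_alt quiz_answer
instance (quiz_answer : List String) (out : Int) : Decidable (Spec_score_cal quiz_answer out) := by unfold Spec_score_cal; infer_instance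

-- ===== CLAIM (what is proved, stated in full; the proofs are below) =====
def Claim_equal_score_cal : Prop := ∀ (quiz_answer : List String), Dom_score_cal quiz_answer → Spec_score_cal quiz_answer (score_cal quiz_answer)

-- ===== LEMMAS AND PROOFS =====

-- exact division of the even product m*(m+1) by 2
theorem tri_floordiv (m : Int) : 2 * PySem.Int.floordiv (m * (m + 1)) 2 = m * (m + 1) := by
  rw [PySem.Int.floordiv_eq_ediv_of_pos (by omega)]
  have h : (2 : Int) ∣ m * (m + 1) := (Int.even_mul_succ_self m).two_dvd
  omega

theorem tri_succ (m : Int) :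
    PySem.Int.floordiv (m * (m + 1)) 2 + m + 1 = PySem.Int.floordiv ((m + 1) * (m + 1 + 1)) 2 := by
  have h1 := tri_floordiv m
  have h2 := tri_floordiv (m + 1)
  nlinarith

theorem tri_zero : PySem.Int.floordiv ((0 : Int) * (0 + 1)) 2 = 0 := by decide

-- invariant: A's score = B's total + triangular of the common streak counter
theorem score_cal_loop (l : List String) (s t c : Int)
    (h : s = t + PySem.Int.floordiv (c * (c + 1)) 2) :
    (l.foldl (fun (st : Int × Int) answer =>
        if "O" == answer then (st.1 + st.2 + 1, st.2 + 1)
        else if "X" == answer then (st.1, 0) else st) (s, c)).1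
    = (fun st : Int × Int => st.1 + PySem.Int.floordiv (st.2 * (st.2 + 1)) 2)
      (l.foldl (fun (st : Int × Int) a =>
        if a == "O" then (st.1, st.2 + 1)
        else if a == "X" then (st.1 + PySem.Int.floordiv (st.2 * (st.2 + 1)) 2, 0) else st) (t, c)) := by
  induction l generalizing s t c with
  | nil => simpa using h
  | cons x xs ih =>
    simp only [List.foldl_cons]
    by_cases hO : x = "O"
    · subst hO; simp only [beq_self_eq_true, reduceIte]
      exact ih _ _ _ (by rw [h, ← tri_succ]; ring)
    · by_cases hX : x = "X"
      · subst hX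
        simp only [show ("O" == "X") = false by decide, show ("X" == "X") = true by decide,
          show ("X" == "O") = false by decide, Bool.false_eq_true, reduceIte]
        exact ih _ _ _ (by rw [tri_zero]; omega)
      · have e1 : ("O" == x) = false := by simp [BEq.beq]; exact fun he => hO he.symm
        have e2 : ("X" == x) = false := by simp [BEq.beq]; exact fun he => hX he.symm
        have e3 : (x == "O") = false := by simp [BEq.beq]; exact hO
        have e4 : (x == "X") = false := by simp [BEq.beq]; exact hX
        simp only [e1, e2, e3, e4, Bool.false_eq_true, reduceIte]
        exact ih _ _ _ h

-- ===== VERDICT (by name: the statement is the Claim_ definition above) =====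
theorem score_cal_spec : Claim_equal_score_cal := by
  intro q _
  unfold Spec_score_cal score_cal score_cal_alt
  exact score_cal_loop q 0 0 0 (by decide)
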